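-- pv_equiv track=rewrite | github.com/moshierming/hkuds-strategy | automation/signal_intelligence.py | classify_into_themes
-- ===== SOURCE A (Python) =====
-- from collections import defaultdict
--
-- THEME_CLUSTERS = {
--     "claude_code_ecosystem": {
--         "label": "Claude Code 生态工具",
--         "keywords": ["claude code", "claude", "agent harness", "skills framework", "superpowers"],
--         "hkuds_relevance": "AutoAgent — 直接竞争",
--     },
--     "agent_memory_knowledge": {
--         "label": "Agent 记忆 & 知识引擎",
--         "keywords": ["agent memory", "knowledge engine", "context database", "cognee", "openrag",
--                      "hindsight", "openviking", "memory", "knowledge base"],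
--         "hkuds_relevance": "LightRAG/MiniRAG — 直接威胁",
--     },
--     "edge_local_llm": {
--         "label": "边缘/本地 LLM 推理",
--         "keywords": ["local llm", "1-bit", "bitnet", "on-device", "edge", "unsloth", "quantization"],
--         "hkuds_relevance": "MiniRAG — 有利生态",
--     },
--     "trading_finance_agent": {
--         "label": "金融 & 交易 Agent",
--         "keywords": ["trading", "stock", "financial", "crypto", "investment", "quant"],
--         "hkuds_relevance": "空白 — HKUDS 无覆盖",
--     },
--     "multimodal_agent": {
--         "label": "多模态 Agent & 视频理解",
--         "keywords": ["multimodal", "vision", "video", "image understanding", "visual"],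
--         "hkuds_relevance": "VideoRAG — 可扩展",
--     },
--     "browser_web_agent": {
--         "label": "浏览器 & Web 自动化 Agent",
--         "keywords": ["browser", "web agent", "headless", "automation", "selenium", "playwright"],
--         "hkuds_relevance": "空白 — CLI-Anything 可扩展",
--     },
--     "code_agent_dev_tool": {
--         "label": "代码生成 & 开发 Agent",
--         "keywords": ["code generation", "coding agent", "swe", "software engineer", "copilot",
--                      "dev tool", "fastcode", "deepcode"],
--         "hkuds_relevance": "FastCode/DeepCode — 可扩展",
--     },
--     "mcp_protocol": {
--         "label": "MCP / Agent 协议标准化",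
--         "keywords": ["mcp", "model context protocol", "agent protocol", "a2a", "openai agents sdk"],
--         "hkuds_relevance": "AnyTool — 部分相关",
--     },
-- }
--
-- def extract_signal_text(signal: dict) -> str:
--     """从信号 dict 提取可用于关键词匹配的文本"""
--     parts = []
--     for key in ["name", "title", "desc", "tagline", "description"]:
--         if key in signal:
--             parts.append(signal[key].lower())
--     return " ".join(parts)
--
-- def classify_into_themes(signals: list[dict]) -> dict[str, list[dict]]:
--     """将信号归类到主题"""
--     theme_signals = defaultdict(list)
--     for sig in signals:
--         text = extract_signal_text(sig)
--         matched_themes = set()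
--         for theme_id, theme in THEME_CLUSTERS.items():
--             for kw in theme["keywords"]:
--                 if kw.lower() in text:
--                     matched_themes.add(theme_id)
--                     break
--         for t in matched_themes:
--             # 避免同一信号在同一主题重复
--             existing_names = [s.get("name", s.get("title", "")) for s in theme_signals[t]]
--             sig_name = sig.get("name", sig.get("title", ""))
--             if sig_name not in existing_names:
--                 theme_signals[t].append(sig)
--
--     return dict(theme_signals)
-- ===== SOURCE B (Python) =====
-- THEME_CLUSTERS = {
--     "claude_code_ecosystem": {
--         "label": "Claude Code 生态工具",
--         "keywords": ["claude code", "claude", "agent harness", "skills framework", "superpowers"],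
--         "hkuds_relevance": "AutoAgent — 直接竞争",
--     },
--     "agent_memory_knowledge": {
--         "label": "Agent 记忆 & 知识引擎",
--         "keywords": ["agent memory", "knowledge engine", "context database", "cognee", "openrag",
--                      "hindsight", "openviking", "memory", "knowledge base"],
--         "hkuds_relevance": "LightRAG/MiniRAG — 直接威胁",
--     },
--     "edge_local_llm": {
--         "label": "边缘/本地 LLM 推理",
--         "keywords": ["local llm", "1-bit", "bitnet", "on-device", "edge", "unsloth", "quantization"],
--         "hkuds_relevance": "MiniRAG — 有利生态",
--     },
--     "trading_finance_agent": {
--         "label": "金融 & 交易 Agent",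
--         "keywords": ["trading", "stock", "financial", "crypto", "investment", "quant"],
--         "hkuds_relevance": "空白 — HKUDS 无覆盖",
--     },
--     "multimodal_agent": {
--         "label": "多模态 Agent & 视频理解",
--         "keywords": ["multimodal", "vision", "video", "image understanding", "visual"],
--         "hkuds_relevance": "VideoRAG — 可扩展",
--     },
--     "browser_web_agent": {
--         "label": "浏览器 & Web 自动化 Agent",
--         "keywords": ["browser", "web agent", "headless", "automation", "selenium", "playwright"],
--         "hkuds_relevance": "空白 — CLI-Anything 可扩展",
--     },
--     "code_agent_dev_tool": {
--         "label": "代码生成 & 开发 Agent",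
--         "keywords": ["code generation", "coding agent", "swe", "software engineer", "copilot",
--                      "dev tool", "fastcode", "deepcode"],
--         "hkuds_relevance": "FastCode/DeepCode — 可扩展",
--     },
--     "mcp_protocol": {
--         "label": "MCP / Agent 协议标准化",
--         "keywords": ["mcp", "model context protocol", "agent protocol", "a2a", "openai agents sdk"],
--         "hkuds_relevance": "AnyTool — 部分相关",
--     },
-- }
--
-- _TEXT_KEYS = ("name", "title", "desc", "tagline", "description")
--
--
-- def _signal_text(sig: dict) -> str:
--     return " ".join(sig[k].lower() for k in _TEXT_KEYS if k in sig)
--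
--
-- def _display_name(sig: dict) -> str:
--     return sig.get("name", sig.get("title", ""))
--
--
-- def _hits(text: str, keywords: list) -> bool:
--     return any(kw.lower() in text for kw in keywords)
--
--
-- def classify_into_themes(signals: list) -> dict:
--     """Theme-first gather: the signal texts are extracted once, the theme order
--     (first appearance over the signal stream) is computed, then each theme's
--     list is assembled independently by one filtered pass over the signals with
--     a per-theme list of already used display names."""
--     tagged = [(sig, _signal_text(sig)) for sig in signals]
--     order = []
--     for _sig, text in tagged:
--         for tid, theme in THEME_CLUSTERS.items():
--             if tid not in order and _hits(text, theme["keywords"]):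
--                 order.append(tid)
--     result = {}
--     for tid in order:
--         kws = THEME_CLUSTERS[tid]["keywords"]
--         bucket, seen = [], []
--         for sig, text in tagged:
--             if _hits(text, kws):
--                 nm = _display_name(sig)
--                 if nm not in seen:
--                     seen.append(nm)
--                     bucket.append(sig)
--         result[tid] = bucket
--     return result
-- ===== Notes on version B (the rewrite author's own statement) =====
-- stated objective: alternative
-- what changed: Replaced the signal-first scatter into a defaultdict (with a per-append rescan of the already-stored names) by a theme-first gather: the texts are extracted once, one pass computes the first-appearance theme order, then each theme's list is assembled independently by a filtered pass over the signals with a per-theme seen-name list.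
import Mathlib
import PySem

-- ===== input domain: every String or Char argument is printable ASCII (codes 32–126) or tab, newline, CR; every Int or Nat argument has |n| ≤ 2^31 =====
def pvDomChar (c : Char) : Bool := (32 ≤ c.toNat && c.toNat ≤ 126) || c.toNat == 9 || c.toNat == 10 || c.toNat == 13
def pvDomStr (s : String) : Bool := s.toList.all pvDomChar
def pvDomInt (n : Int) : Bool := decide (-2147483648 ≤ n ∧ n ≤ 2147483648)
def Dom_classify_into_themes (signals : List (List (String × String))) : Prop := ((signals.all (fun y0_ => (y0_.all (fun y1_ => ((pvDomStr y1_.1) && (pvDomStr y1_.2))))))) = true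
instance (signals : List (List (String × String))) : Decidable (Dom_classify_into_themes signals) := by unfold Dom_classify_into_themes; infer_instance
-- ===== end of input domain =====

-- B replaces A's signal-first scatter into a dict (with a rescan of already-stored names before
-- each append) by a theme-first gather: texts extracted once, the first-appearance theme order
-- computed, then each theme's list assembled by its own filtered pass over the signals with a
-- per-theme seen-name list (objective: alternative).

-- ===== shared module context =====
-- THEME_CLUSTERS restricted to the "keywords" field: the id and keywords are the only parts
-- classify_into_themes reads ("label"/"hkuds_relevance" are never accessed).
def themeClusters : List (String × List String) :=
  [("claude_code_ecosystem", ["claude code", "claude", "agent harness", "skills framework", "superpowers"]),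
   ("agent_memory_knowledge", ["agent memory", "knowledge engine", "context database", "cognee", "openrag",
                               "hindsight", "openviking", "memory", "knowledge base"]),
   ("edge_local_llm", ["local llm", "1-bit", "bitnet", "on-device", "edge", "unsloth", "quantization"]),
   ("trading_finance_agent", ["trading", "stock", "financial", "crypto", "investment", "quant"]),
   ("multimodal_agent", ["multimodal", "vision", "video", "image understanding", "visual"]),
   ("browser_web_agent", ["browser", "web agent", "headless", "automation", "selenium", "playwright"]),
   ("code_agent_dev_tool", ["code generation", "coding agent", "swe", "software engineer", "copilot",
                            "dev tool", "fastcode", "deepcode"]),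
   ("mcp_protocol", ["mcp", "model context protocol", "agent protocol", "a2a", "openai agents sdk"])]

-- ===== PORT A =====
-- extract_signal_text (module helper used by A)
def extractSignalText (sig : List (String × String)) : String :=
  PySem.Str.join " "
    ((["name", "title", "desc", "tagline", "description"] : List String).foldl
      (fun parts key =>
        if PySem.Dict.contains (PySem.Dict.mk sig) key then
          parts ++ [PySem.Str.lower (PySem.Dict.getD (PySem.Dict.mk sig) key "")]
        else parts) [])

-- sig.get("name", sig.get("title", ""))
def sigName (sig : List (String × String)) : String :=
  PySem.Dict.getD (PySem.Dict.mk sig) "name" (PySem.Dict.getD (PySem.Dict.mk sig) "title" "")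

-- NOTE on order: Python iterates `matched_themes` (a set) in unspecified hash order, so the key
-- order of A's result dict is unspecified; the port iterates the PySem.Set in insertion order
-- (dict outputs are compared as dicts, ignoring key order).
def classify_into_themes (signals : List (List (String × String))) : List (String × List (List (String × String))) :=
  (signals.foldl
    (fun d sig =>
      let text := extractSignalText sig
      let matched : PySem.Set String :=
        themeClusters.foldl
          (fun m p =>
            if p.2.any (fun kw => PySem.Str.isIn (PySem.Str.lower kw) text) then PySem.Set.add m p.1
            else m)
          PySem.Set.empty
      matched.foldl
        (fun d t =>
          let existing := (PySem.Dict.getD d t []).map sigName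
          if existing.contains (sigName sig) then d
          else PySem.Dict.insert d t (PySem.Dict.getD d t [] ++ [sig]))
        d)
    PySem.Dict.empty).items

-- ===== PORT B =====
-- _signal_text: '" ".join(sig[k].lower() for k in _TEXT_KEYS if k in sig)'
def sigTextB (sig : List (String × String)) : String :=
  PySem.Str.join " "
    (((["name", "title", "desc", "tagline", "description"] : List String).filter
        (fun k => PySem.Dict.contains (PySem.Dict.mk sig) k)).map
      (fun k => PySem.Str.lower (PySem.Dict.getD (PySem.Dict.mk sig) k "")))

-- _display_name: 'sig.get("name", sig.get("title", ""))'
def displayName (sig : List (String × String)) : String :=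
  PySem.Dict.getD (PySem.Dict.mk sig) "name" (PySem.Dict.getD (PySem.Dict.mk sig) "title" "")

-- _hits: 'any(kw.lower() in text for kw in keywords)'
def hitsB (text : String) : List String → Bool
  | [] => false
  | kw :: kws => PySem.Str.isIn (PySem.Str.lower kw) text || hitsB text kws

-- inner loop of the order pass: 'for tid, theme in THEME_CLUSTERS.items(): if tid not in order and _hits(...)'
def orderScan (text : String) : List (String × List String) → List String → List String
  | [], o => o
  | th :: rest, o =>
      orderScan text rest (if !o.contains th.1 && hitsB text th.2 then o ++ [th.1] else o)

-- outer loop of the order pass over the tagged (signal, text) stream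
def themeOrderB : List (List (String × String) × String) → List String → List String
  | [], o => o
  | sg :: rest, o => themeOrderB rest (orderScan sg.2 themeClusters o)

-- per-theme gather: one filtered pass over the tagged stream with bucket and seen-name list
def gatherB (kws : List String) : List (List (String × String) × String) →
    List (List (String × String)) → List String → List (List (String × String))
  | [], bucket, _ => bucket
  | sg :: rest, bucket, seen =>
      if hitsB sg.2 kws then
        if seen.contains (displayName sg.1) then gatherB kws rest bucket seen
        else gatherB kws rest (bucket ++ [sg.1]) (seen ++ [displayName sg.1])
      else gatherB kws rest bucket seen

-- Source B fills `result` key by key over `order` (whose entries are distinct) and returns it: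
-- its items are exactly this map. THEME_CLUSTERS[tid]["keywords"] is the getD lookup (tid is a key).
def classify_into_themes_alt (signals : List (List (String × String))) : List (String × List (List (String × String))) :=
  let tagged := signals.map (fun sig => (sig, sigTextB sig))
  (themeOrderB tagged []).map (fun tid =>
    (tid, gatherB (PySem.Dict.getD (PySem.Dict.mk themeClusters) tid []) tagged [] []))

-- ===== PRECONDITION & SPEC =====
def Spec_classify_into_themes (signals : List (List (String × String))) (out : List (String × List (List (String × String)))) : Prop := out = classify_into_themes_alt signals
instance (signals : List (List (String × String))) (out : List (String × List (List (String × String)))) : Decidable (Spec_classify_into_themes signals out) := by unfold Spec_classify_into_themes; infer_instance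

-- ===== CLAIM (what is proved, stated in full; the proofs are below) =====
def Claim_equal_classify_into_themes : Prop := ∀ (signals : List (List (String × String))), Dom_classify_into_themes signals → Spec_classify_into_themes signals (classify_into_themes signals)

-- ===== LEMMAS AND PROOFS =====

-- A's matching condition on one THEME_CLUSTERS entry
def mcond (sig : List (String × String)) (p : String × List String) : Bool :=
  p.2.any (fun kw => PySem.Str.isIn (PySem.Str.lower kw) (extractSignalText sig))

-- the theme ids matching a signal, in THEME_CLUSTERS order (canonical middle form)
def matchedThemeIds (sig : List (String × String)) : List String :=
  (themeClusters.filter (mcond sig)).map (·.1)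

-- A's per-theme dict update (the body of `for t in matched_themes`)
def updA (sig : List (String × String)) (d : PySem.Dict String (List (List (String × String)))) (t : String) : PySem.Dict String (List (List (String × String))) :=
  if ((PySem.Dict.getD d t []).map sigName).contains (sigName sig) then d
  else PySem.Dict.insert d t (PySem.Dict.getD d t [] ++ [sig])

-- A's whole fold, with the matched set replaced by the matched-id list (justified below)
def foldA (hist : List (List (String × String))) : PySem.Dict String (List (List (String × String))) :=
  hist.foldl (fun d sig => (matchedThemeIds sig).foldl (updA sig) d) PySem.Dict.empty

-- the first-appearance theme order
def ordOf (hist : List (List (String × String))) : List String :=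
  hist.foldl (fun o sig => PySem.Set.update o (matchedThemeIds sig)) []

-- canonical per-theme (bucket, seen-names) accumulation
def gstep (t : String) (st : List (List (String × String)) × List String) (sig : List (String × String)) : List (List (String × String)) × List String :=
  if (matchedThemeIds sig).contains t then
    (if st.2.contains (sigName sig) then st
     else (st.1 ++ [sig], st.2 ++ [sigName sig]))
  else st

def gat (t : String) (hist : List (List (String × String))) : List (List (String × String)) × List String :=
  hist.foldl (gstep t) ([], [])

theorem setfold_eq_filter_map {α : Type} (c : String × α → Bool) :
    ∀ (ts : List (String × α)) (s : PySem.Set String), (ts.map (·.1)).Nodup → (∀ p ∈ ts, p.1 ∉ s) →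
      ts.foldl (fun m p => if c p then PySem.Set.add m p.1 else m) s = s ++ (ts.filter c).map (·.1) := by
  intro ts
  induction ts with
  | nil => intro s _ _; simp
  | cons p ts ih =>
    intro s hnd hout
    simp only [List.map_cons, List.nodup_cons] at hnd
    by_cases hc : c p
    · have hps : p.1 ∉ s := hout p List.mem_cons_self
      have hcf : PySem.Set.contains s p.1 = false := by
        simp only [PySem.Set.contains]
        rw [← Bool.not_eq_true]
        exact fun h => hps (List.contains_iff_mem.mp h)
      have hadd : PySem.Set.add s p.1 = s ++ [p.1] := by
        unfold PySem.Set.add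
        rw [hcf]
        simp
      have hout' : ∀ q ∈ ts, q.1 ∉ s ++ [p.1] := by
        intro q hq
        simp only [List.mem_append, List.mem_singleton]
        rintro (h | h)
        · exact hout q (List.mem_cons_of_mem _ hq) h
        · exact hnd.1 (h ▸ List.mem_map_of_mem hq)
      simp only [List.foldl_cons, hc, if_true, hadd, ih (s ++ [p.1]) hnd.2 hout', List.filter_cons,
        List.map_cons, List.append_assoc, List.singleton_append]
    · simp only [List.foldl_cons, hc, if_false, List.filter_cons, Bool.false_eq_true,
        ih s hnd.2 (fun q hq => hout q (List.mem_cons_of_mem _ hq))]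

theorem themeIds_nodup : (themeClusters.map (·.1)).Nodup := by decide

theorem matched_set_eq (sig : List (String × String)) :
    themeClusters.foldl
      (fun m p =>
        if p.2.any (fun kw => PySem.Str.isIn (PySem.Str.lower kw) (extractSignalText sig)) then PySem.Set.add m p.1
        else m)
      PySem.Set.empty = matchedThemeIds sig := by
  rw [setfold_eq_filter_map _ themeClusters PySem.Set.empty themeIds_nodup (by intro p _ h; simp [PySem.Set.empty] at h)]
  rfl

theorem matched_nodup (sig : List (String × String)) : (matchedThemeIds sig).Nodup := by
  unfold matchedThemeIds
  exact themeIds_nodup.sublist (List.Sublist.map _ List.filter_sublist)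

theorem matched_sub_keys (sig : List (String × String)) :
    ∀ t ∈ matchedThemeIds sig, t ∈ themeClusters.map (·.1) := by
  intro t ht
  unfold matchedThemeIds at ht
  obtain ⟨q, hq, rfl⟩ := List.mem_map.mp ht
  exact List.mem_map_of_mem (List.mem_filter.mp hq).1

theorem portA_eq (signals : List (List (String × String))) :
    classify_into_themes signals = (foldA signals).items := by
  simp only [classify_into_themes, matched_set_eq]
  rfl

-- ===== A-side: dict lemmas reducing foldA to (ordOf, gat) =====

theorem mem_keys_of_contains {ν : Type} (d : PySem.Dict String ν) (k : String)
    (h : d.contains k = true) : k ∈ d.keys := by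
  unfold PySem.Dict.contains at h
  obtain ⟨p, hp, he⟩ := List.any_eq_true.mp h
  simp only [PySem.Dict.keys]
  exact (beq_iff_eq.mp he) ▸ List.mem_map_of_mem hp

theorem keys_insert' {ν : Type} (d : PySem.Dict String ν) (k : String) (v : ν) :
    (PySem.Dict.insert d k v).keys = PySem.Set.add d.keys k := by
  by_cases hc : d.contains k = true
  · have hk : k ∈ d.keys := mem_keys_of_contains d k hc
    unfold PySem.Dict.insert
    rw [if_pos hc, PySem.Set.add_of_mem hk]
    simp only [PySem.Dict.keys, List.map_map]
    apply List.map_congr_left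
    intro p _
    show (if (p.1 == k) = true then (k, v) else p).1 = p.1
    by_cases hpk : (p.1 == k) = true
    · rw [if_pos hpk]
      exact (beq_iff_eq.mp hpk).symm
    · rw [if_neg hpk]
  · have hk : k ∉ d.keys := fun hmem => hc (by
      unfold PySem.Dict.contains
      apply List.any_eq_true.mpr
      obtain ⟨p, hp, he⟩ := List.mem_map.mp hmem
      exact ⟨p, hp, by simp [he]⟩)
    rw [Bool.not_eq_true] at hc
    have hcf : PySem.Set.contains d.keys k = false := by
      simp only [PySem.Set.contains]
      rw [← Bool.not_eq_true]
      exact fun h => hk (List.contains_iff_mem.mp h)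
    unfold PySem.Dict.insert PySem.Set.add
    rw [hc, hcf]
    simp [PySem.Dict.keys]

theorem keys_updA (sig : List (String × String)) (d : PySem.Dict String (List (List (String × String)))) (t : String) :
    (updA sig d t).keys = PySem.Set.add d.keys t := by
  unfold updA
  split
  · rename_i h
    have hne : PySem.Dict.getD d t ([] : List (List (String × String))) ≠ [] := by
      intro he; rw [he] at h; simp at h
    have hcontains : d.contains t = true := by
      by_contra hc
      exact hne (PySem.Dict.getD_of_not_contains d [] (by simpa using hc))
    exact (PySem.Set.add_of_mem (mem_keys_of_contains d t hcontains)).symm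
  · exact keys_insert' d t _

theorem keys_fold_upd (sig : List (String × String)) :
    ∀ (ts : List String) (d : PySem.Dict String (List (List (String × String)))),
      (ts.foldl (updA sig) d).keys = PySem.Set.update d.keys ts := by
  intro ts
  induction ts with
  | nil => intro d; simp [PySem.Set.update]
  | cons a ts ih =>
    intro d
    simp only [List.foldl_cons, ih (updA sig d a), keys_updA, PySem.Set.update]

theorem getD_updA (sig : List (String × String)) (d : PySem.Dict String (List (List (String × String)))) (a t : String) :
    PySem.Dict.getD (updA sig d a) t [] =
      if t = a then
        (if ((PySem.Dict.getD d a []).map sigName).contains (sigName sig) then PySem.Dict.getD d a []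
         else PySem.Dict.getD d a [] ++ [sig])
      else PySem.Dict.getD d t [] := by
  unfold updA
  split_ifs with h1 h2 h2
  · rw [h2]
  · rfl
  · rw [PySem.Dict.getD_insert, if_pos h2]
  · rw [PySem.Dict.getD_insert, if_neg h2]

theorem getD_fold_upd (sig : List (String × String)) :
    ∀ (ts : List String), ts.Nodup → ∀ (d : PySem.Dict String (List (List (String × String)))) (t : String),
      PySem.Dict.getD (ts.foldl (updA sig) d) t [] =
        if ts.contains t then
          (if ((PySem.Dict.getD d t []).map sigName).contains (sigName sig) then PySem.Dict.getD d t []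
           else PySem.Dict.getD d t [] ++ [sig])
        else PySem.Dict.getD d t [] := by
  intro ts
  induction ts with
  | nil => intro _ d t; simp
  | cons a ts ih =>
    intro hnd d t
    simp only [List.nodup_cons] at hnd
    rw [List.foldl_cons, ih hnd.2 (updA sig d a) t]
    by_cases hta : t = a
    · subst hta
      have hts : ts.contains t = false := by
        rw [← Bool.not_eq_true]
        exact fun h => hnd.1 (List.contains_iff_mem.mp h)
      have hcc : (t :: ts).contains t = true := by simp
      rw [hts, hcc, if_pos rfl, if_neg (by decide : ¬(false = true)), getD_updA, if_pos rfl]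
    · have hcc : (a :: ts).contains t = ts.contains t := by
        simp only [List.contains_cons]
        have hba : (t == a) = false := by simpa using hta
        rw [hba, Bool.false_or]
      rw [hcc, getD_updA, if_neg hta]

theorem gat_inv (t : String) :
    ∀ (hist : List (List (String × String))) (st : List (List (String × String)) × List String),
      st.2 = st.1.map sigName → (hist.foldl (gstep t) st).2 = (hist.foldl (gstep t) st).1.map sigName := by
  intro hist
  induction hist with
  | nil => intro st h; exact h
  | cons sig hist ih =>
    intro st h
    simp only [List.foldl_cons]
    apply ih
    unfold gstep
    split
    · split
      · exact h
      · simp [h]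
    · exact h

theorem gat_snd (t : String) (hist : List (List (String × String))) :
    (gat t hist).2 = (gat t hist).1.map sigName :=
  gat_inv t hist ([], []) rfl

theorem gat_append (t : String) (hist sig) :
    (gat t (hist ++ [sig])).1 =
      if (matchedThemeIds sig).contains t then
        (if ((gat t hist).1.map sigName).contains (sigName sig) then (gat t hist).1
         else (gat t hist).1 ++ [sig])
      else (gat t hist).1 := by
  have h1 : gat t (hist ++ [sig]) = gstep t (gat t hist) sig := by
    unfold gat
    rw [List.foldl_append, List.foldl_cons, List.foldl_nil]
  rw [h1]
  unfold gstep
  rw [gat_snd t hist]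
  split
  · split <;> rfl
  · rfl

theorem set_update_nodup {α : Type} [BEq α] [LawfulBEq α] :
    ∀ (xs : List α) (s : PySem.Set α), s.Nodup → (PySem.Set.update s xs).Nodup := by
  intro xs
  induction xs with
  | nil => intro s h; exact h
  | cons x xs ih => intro s h; exact ih _ (PySem.Set.nodup_add s x h)

theorem ordOf_nodup (hist : List (List (String × String))) : (ordOf hist).Nodup := by
  unfold ordOf
  generalize hgen : ([] : PySem.Set String) = s
  have hs : s.Nodup := hgen ▸ List.nodup_nil
  clear hgen
  induction hist generalizing s with
  | nil => exact hs
  | cons sig hist ih => exact ih _ (set_update_nodup _ s hs)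

theorem ordOf_sub_keys (hist : List (List (String × String))) :
    ∀ t ∈ ordOf hist, t ∈ themeClusters.map (·.1) := by
  unfold ordOf
  generalize hgen : ([] : PySem.Set String) = s
  have hs : ∀ t ∈ s, t ∈ themeClusters.map (·.1) := by
    intro t ht; rw [← hgen] at ht; cases ht
  clear hgen
  induction hist generalizing s with
  | nil => exact hs
  | cons sig hist ih =>
    refine ih _ ?_
    intro t ht
    rcases (PySem.Set.mem_update _ _ _).mp ht with h | h
    · exact hs t h
    · exact matched_sub_keys sig t h

theorem main_inv (hist : List (List (String × String))) :
    (foldA hist).keys = ordOf hist ∧ ∀ t, PySem.Dict.getD (foldA hist) t [] = (gat t hist).1 := by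
  induction hist using List.reverseRecOn with
  | nil =>
    constructor
    · simp [foldA, ordOf, PySem.Dict.keys_empty]
    · intro t; simp [foldA, gat, PySem.Dict.getD_empty]
  | append_singleton hist sig ih =>
    have hfold : foldA (hist ++ [sig]) = (matchedThemeIds sig).foldl (updA sig) (foldA hist) := by
      unfold foldA; rw [List.foldl_append]; rfl
    constructor
    · rw [hfold, keys_fold_upd, ih.1]
      unfold ordOf
      rw [List.foldl_append]
      rfl
    · intro t
      rw [hfold, getD_fold_upd sig (matchedThemeIds sig) (matched_nodup sig) (foldA hist) t,
        gat_append, ih.2 t]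

-- ===== B-side: reducing the gather port to (ordOf, gat) =====

theorem sigTextB_eq (sig : List (String × String)) : sigTextB sig = extractSignalText sig := by
  unfold sigTextB extractSignalText
  rw [PySem.List.foldl_append_if]
  rfl

theorem hitsB_any (text : String) (kws : List String) :
    hitsB text kws = kws.any (fun kw => PySem.Str.isIn (PySem.Str.lower kw) text) := by
  induction kws with
  | nil => rfl
  | cons kw kws ih => simp [hitsB, ih]

theorem hitsB_mcond (sig : List (String × String)) (p : String × List String) :
    hitsB (sigTextB sig) p.2 = mcond sig p := by
  rw [hitsB_any, sigTextB_eq]; rfl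

theorem getD_theme : ∀ p ∈ themeClusters,
    PySem.Dict.getD (PySem.Dict.mk themeClusters) p.1 ([] : List String) = p.2 := by decide

theorem theme_key_inj : ∀ p ∈ themeClusters, ∀ q ∈ themeClusters, p.1 = q.1 → p = q :=
  List.inj_on_of_nodup_map themeIds_nodup

theorem contains_matched (sig : List (String × String)) (p : String × List String)
    (hp : p ∈ themeClusters) : (matchedThemeIds sig).contains p.1 = mcond sig p := by
  by_cases hc : mcond sig p = true
  · rw [hc]
    rw [List.contains_iff_mem]
    exact List.mem_map_of_mem (List.mem_filter.mpr ⟨hp, hc⟩)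
  · rw [Bool.not_eq_true] at hc
    rw [hc, ← Bool.not_eq_true, List.contains_iff_mem]
    intro hmem
    obtain ⟨q, hq, hq1⟩ := List.mem_map.mp hmem
    obtain ⟨hqm, hqc⟩ := List.mem_filter.mp hq
    have : q = p := theme_key_inj q hqm p hp hq1
    rw [this, hc] at hqc
    cases hqc

theorem orderScan_eq (text : String) :
    ∀ (ts : List (String × List String)) (o : List String),
      orderScan text ts o = ts.foldl (fun o p => if hitsB text p.2 then PySem.Set.add o p.1 else o) o := by
  intro ts
  induction ts with
  | nil => intro o; rfl
  | cons p ts ih =>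
    intro o
    rw [orderScan, ih, List.foldl_cons]
    congr 1
    by_cases hh : hitsB text p.2
    · simp [hh, PySem.Set.add, PySem.Set.contains]
    · simp only [Bool.not_eq_true] at hh
      simp [hh]

theorem condfold_eq_update (sig : List (String × String)) :
    ∀ (ts : List (String × List String)) (o : PySem.Set String),
      ts.foldl (fun o p => if mcond sig p then PySem.Set.add o p.1 else o) o
        = PySem.Set.update o ((ts.filter (mcond sig)).map (·.1)) := by
  intro ts
  induction ts with
  | nil => intro o; simp [PySem.Set.update]
  | cons p ts ih =>
    intro o
    by_cases hc : mcond sig p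
    · simp only [List.foldl_cons, hc, if_true, ih, List.filter_cons, List.map_cons,
        PySem.Set.update_cons]
    · simp only [List.foldl_cons, hc, if_false, ih, List.filter_cons, Bool.false_eq_true]

theorem themeOrderB_eq :
    ∀ (hist : List (List (String × String))) (o : List String),
      themeOrderB (hist.map (fun sig => (sig, sigTextB sig))) o
        = hist.foldl (fun o sig => PySem.Set.update o (matchedThemeIds sig)) o := by
  intro hist
  induction hist with
  | nil => intro o; rfl
  | cons sig hist ih =>
    intro o
    rw [List.map_cons, themeOrderB, ih, List.foldl_cons]
    congr 1
    rw [orderScan_eq]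
    have hfun : (fun (o : List String) (p : String × List String) =>
        if hitsB (sigTextB sig) p.2 then PySem.Set.add o p.1 else o)
      = (fun o p => if mcond sig p then PySem.Set.add o p.1 else o) := by
      funext o p
      rw [hitsB_mcond]
    rw [hfun, condfold_eq_update]
    rfl

theorem gatherB_eq (p : String × List String) (hp : p ∈ themeClusters) :
    ∀ (hist : List (List (String × String))) (bucket : List (List (String × String))) (seen : List String),
      gatherB p.2 (hist.map (fun sig => (sig, sigTextB sig))) bucket seen
        = (hist.foldl (gstep p.1) (bucket, seen)).1 := by
  intro hist
  induction hist with
  | nil => intro bucket seen; rfl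
  | cons sig hist ih =>
    intro bucket seen
    rw [List.map_cons, List.foldl_cons]
    show (if hitsB (sigTextB sig) p.2 then _ else _) = _
    rw [hitsB_mcond]
    unfold gstep
    rw [contains_matched sig p hp]
    by_cases hc : mcond sig p
    · rw [if_pos hc, if_pos hc]
      by_cases hs : seen.contains (displayName sig)
      · have hs' : (bucket, seen).2.contains (sigName sig) = true := hs
        rw [if_pos hs, if_pos hs']
        exact ih bucket seen
      · simp only [Bool.not_eq_true] at hs
        have hs' : (bucket, seen).2.contains (sigName sig) = false := hs
        rw [hs, hs']
        simp only [Bool.false_eq_true, if_false]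
        exact ih (bucket ++ [sig]) (seen ++ [displayName sig])
    · simp only [Bool.not_eq_true] at hc
      rw [hc]
      simp only [Bool.false_eq_true, if_false]
      exact ih bucket seen

theorem portB_eq (signals : List (List (String × String))) :
    classify_into_themes_alt signals = (ordOf signals).map (fun t => (t, (gat t signals).1)) := by
  show (themeOrderB (signals.map fun sig => (sig, sigTextB sig)) []).map
      (fun tid => (tid, gatherB (PySem.Dict.getD (PySem.Dict.mk themeClusters) tid [])
        (signals.map fun sig => (sig, sigTextB sig)) [] [])) = _
  rw [themeOrderB_eq signals []]
  apply List.map_congr_left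
  intro t ht
  have ht' : t ∈ ordOf signals := ht
  obtain ⟨p, hp, hp1⟩ := List.mem_map.mp (ordOf_sub_keys signals t ht')
  subst hp1
  rw [getD_theme p hp, gatherB_eq p hp signals [] []]
  rfl

-- ===== VERDICT (by name: the statement is the Claim_ definition above) =====
theorem classify_into_themes_spec : Claim_equal_classify_into_themes := by
  intro signals _
  unfold Spec_classify_into_themes
  rw [portA_eq, portB_eq]
  obtain ⟨hkeys, hvals⟩ := main_inv signals
  rw [PySem.Dict.items_eq_map_keys (foldA signals) (hkeys ▸ ordOf_nodup signals) [], hkeys]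
  exact List.map_congr_left (fun t _ => by rw [hvals t])
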